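-- pv_equiv track=rewrite | github.com/PaddlePaddle/models | PaddleCV/PaddleGAN/util/utility.py | check_attribute_conflict
-- ===== SOURCE A (Python) =====
-- def check_attribute_conflict(label_batch, attr, attrs):
--     ''' Based on https://github.com/LynnHo/AttGAN-Tensorflow'''
--
--     def _set(label, value, attr):
--         if attr in attrs:
--             label[attrs.index(attr)] = value
--
--     attr_id = attrs.index(attr)
--     for label in label_batch:
--         if attr in ['Bald', 'Receding_Hairline'] and attrs[attr_id] != 0:
--             _set(label, 0, 'Bangs')
--         elif attr == 'Bangs' and attrs[attr_id] != 0: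
--             _set(label, 0, 'Bald')
--             _set(label, 0, 'Receding_Hairline')
--         elif attr in ['Black_Hair', 'Blond_Hair', 'Brown_Hair', 'Gray_Hair'
--                       ] and attrs[attr_id] != 0:
--             for a in ['Black_Hair', 'Blond_Hair', 'Brown_Hair', 'Gray_Hair']:
--                 if a != attr:
--                     _set(label, 0, a)
--         elif attr in ['Straight_Hair', 'Wavy_Hair'] and attrs[attr_id] != 0:
--             for a in ['Straight_Hair', 'Wavy_Hair']:
--                 if a != attr:
--                     _set(label, 0, a)
--     return label_batch
-- ===== SOURCE B (Python) =====
-- _CONFLICTS = {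
--     'Bald': ['Bangs'],
--     'Receding_Hairline': ['Bangs'],
--     'Bangs': ['Bald', 'Receding_Hairline'],
--     'Black_Hair': ['Blond_Hair', 'Brown_Hair', 'Gray_Hair'],
--     'Blond_Hair': ['Black_Hair', 'Brown_Hair', 'Gray_Hair'],
--     'Brown_Hair': ['Black_Hair', 'Blond_Hair', 'Gray_Hair'],
--     'Gray_Hair': ['Black_Hair', 'Blond_Hair', 'Brown_Hair'],
--     'Straight_Hair': ['Wavy_Hair'],
--     'Wavy_Hair': ['Straight_Hair'],
-- }
--
--
-- def check_attribute_conflict(label_batch, attr, attrs):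
--     """Zero out attributes conflicting with `attr` in every label (in place).
--
--     Same ValueError as the original when attr is missing from attrs."""
--     attrs.index(attr)
--     idxs = [attrs.index(a) for a in _CONFLICTS.get(attr, []) if a in attrs]
--     for label in label_batch:
--         for i in idxs:
--             label[i] = 0
--     return label_batch
-- ===== Notes on version B (the rewrite author's own statement) =====
-- stated objective: simpler
-- what changed: Replaces the per-label if/elif dispatch with repeated attrs.index calls inside the loop by a precomputed conflict table: the conflicting indices are resolved once before the loop, and a single uniform pass zeroes them in every label.
import Mathlib
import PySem

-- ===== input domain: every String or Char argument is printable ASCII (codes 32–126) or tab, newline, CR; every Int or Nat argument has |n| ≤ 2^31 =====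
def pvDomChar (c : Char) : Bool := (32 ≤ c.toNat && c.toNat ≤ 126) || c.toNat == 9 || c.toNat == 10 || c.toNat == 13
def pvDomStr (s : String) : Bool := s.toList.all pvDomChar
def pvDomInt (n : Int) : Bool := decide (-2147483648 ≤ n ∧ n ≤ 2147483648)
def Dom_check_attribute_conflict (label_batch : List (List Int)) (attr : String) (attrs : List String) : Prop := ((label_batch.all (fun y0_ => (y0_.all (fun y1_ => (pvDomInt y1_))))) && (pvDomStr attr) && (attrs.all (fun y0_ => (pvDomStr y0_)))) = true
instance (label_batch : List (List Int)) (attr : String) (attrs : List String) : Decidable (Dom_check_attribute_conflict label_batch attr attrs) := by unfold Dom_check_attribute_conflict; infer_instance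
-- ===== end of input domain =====

-- B precomputes the conflicting indices once before the loop instead of A's per-label
-- if/elif dispatch (objective: simpler).  A mutates label_batch in place and returns it;
-- the equivalence proved here is about the RETURN value (B performs the same mutation).

-- ===== PORT A =====
-- _set(label, value, attr): label[attrs.index(attr)] = value when attr in attrs.
-- Python's in-range nonnegative assignment label[i] = v is PySem.List.pySetD (exact under Pre_).
def pvSetA (attrs : List String) (label : List Int) (value : Int) (a : String) : List Int :=
  if attrs.contains a then
    match PySem.List.index? attrs a with
    | some i => PySem.List.pySetD label (Int.ofNat i) value
    | none => label
  else label

-- the body of A's for-loop for one label; the Python tests `attrs[attr_id] != 0`, which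
-- compares a string with the int 0 and is always True in Python, so it is ported as no test.
def pvBodyA (attrs : List String) (attr : String) (label : List Int) : List Int :=
  if attr = "Bald" ∨ attr = "Receding_Hairline" then
    pvSetA attrs label 0 "Bangs"
  else if attr = "Bangs" then
    pvSetA attrs (pvSetA attrs label 0 "Bald") 0 "Receding_Hairline"
  else if attr = "Black_Hair" ∨ attr = "Blond_Hair" ∨ attr = "Brown_Hair" ∨ attr = "Gray_Hair" then
    ["Black_Hair", "Blond_Hair", "Brown_Hair", "Gray_Hair"].foldl
      (fun l a => if a ≠ attr then pvSetA attrs l 0 a else l) label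
  else if attr = "Straight_Hair" ∨ attr = "Wavy_Hair" then
    ["Straight_Hair", "Wavy_Hair"].foldl
      (fun l a => if a ≠ attr then pvSetA attrs l 0 a else l) label
  else label

-- attrs.index(attr) raises ValueError when attr ∉ attrs (excluded by Pre_); the none branch
-- stands for that raise.
def check_attribute_conflict (label_batch : List (List Int)) (attr : String) (attrs : List String) : List (List Int) :=
  match PySem.List.index? attrs attr with
  | none => label_batch
  | some _ => label_batch.map (fun label => pvBodyA attrs attr label)

-- ===== PORT B =====
-- the module-level _CONFLICTS dict of Source B, as a lookup (CONFLICTS.get(attr, []))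
def pvConflicts (attr : String) : List String :=
  if attr = "Bald" then ["Bangs"]
  else if attr = "Receding_Hairline" then ["Bangs"]
  else if attr = "Bangs" then ["Bald", "Receding_Hairline"]
  else if attr = "Black_Hair" then ["Blond_Hair", "Brown_Hair", "Gray_Hair"]
  else if attr = "Blond_Hair" then ["Black_Hair", "Brown_Hair", "Gray_Hair"]
  else if attr = "Brown_Hair" then ["Black_Hair", "Blond_Hair", "Gray_Hair"]
  else if attr = "Gray_Hair" then ["Black_Hair", "Blond_Hair", "Brown_Hair"]
  else if attr = "Straight_Hair" then ["Wavy_Hair"]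
  else if attr = "Wavy_Hair" then ["Straight_Hair"]
  else []

def check_attribute_conflict_alt (label_batch : List (List Int)) (attr : String) (attrs : List String) : List (List Int) :=
  match PySem.List.index? attrs attr with
  | none => label_batch  -- attrs.index(attr) raises ValueError there (excluded by Pre_)
  | some _ =>
    -- idxs = [attrs.index(a) for a in _CONFLICTS.get(attr, []) if a in attrs]
    let idxs : List Nat :=
      ((pvConflicts attr).filter (fun a => attrs.contains a)).filterMap
        (fun a => PySem.List.index? attrs a)
    label_batch.map (fun label =>
      idxs.foldl (fun l i => PySem.List.pySetD l (Int.ofNat i) 0) label)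

-- ===== PRECONDITION & SPEC =====
-- Pre_ excludes exactly the inputs where the Python raises: attr not in attrs (ValueError in
-- both A and B), and labels shorter than some conflicting index to be written (IndexError in both).
def Pre_check_attribute_conflict (label_batch : List (List Int)) (attr : String) (attrs : List String) : Prop :=
  attr ∈ attrs ∧
  ∀ label ∈ label_batch, ∀ a ∈ pvConflicts attr, ∀ i,
    PySem.List.index? attrs a = some i → i < label.length
instance (label_batch : List (List Int)) (attr : String) (attrs : List String) : Decidable (Pre_check_attribute_conflict label_batch attr attrs) := by unfold Pre_check_attribute_conflict; infer_instance

def pvWitness_check_attribute_conflict : List (List Int) × String × List String :=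
  ([[1, 1, 1], [0, 1, 0]], "Bangs", ["Bald", "Bangs", "Receding_Hairline"])

def Spec_check_attribute_conflict (label_batch : List (List Int)) (attr : String) (attrs : List String) (out : List (List Int)) : Prop := out = check_attribute_conflict_alt label_batch attr attrs
instance (label_batch : List (List Int)) (attr : String) (attrs : List String) (out : List (List Int)) : Decidable (Spec_check_attribute_conflict label_batch attr attrs out) := by unfold Spec_check_attribute_conflict; infer_instance

-- ===== CLAIM (what is proved, stated in full; the proofs are below) =====
def Claim_equal_check_attribute_conflict : Prop := ∀ (label_batch : List (List Int)) (attr : String) (attrs : List String), Dom_check_attribute_conflict label_batch attr attrs → Pre_check_attribute_conflict label_batch attr attrs → Spec_check_attribute_conflict label_batch attr attrs (check_attribute_conflict label_batch attr attrs)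

-- ===== LEMMAS AND PROOFS =====

theorem fold_filter_cons (attrs : List String) (label : List Int) (a : String) (as_ : List String) :
    ((((a :: as_).filter (fun x => attrs.contains x)).filterMap
        (fun x => PySem.List.index? attrs x)).foldl
          (fun l i => PySem.List.pySetD l (Int.ofNat i) 0) label) =
      (((as_.filter (fun x => attrs.contains x)).filterMap
        (fun x => PySem.List.index? attrs x)).foldl
          (fun l i => PySem.List.pySetD l (Int.ofNat i) 0) (pvSetA attrs label 0 a)) := by
  by_cases h : a ∈ attrs
  · have hs : (PySem.List.index? attrs a).isSome := (PySem.List.index?_isSome_iff attrs a).mpr h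
    rcases Option.isSome_iff_exists.mp hs with ⟨i, hi⟩
    have hi' : List.idxOf? a attrs = some i := by
      simpa [PySem.List.index?_eq_idxOf?] using hi
    simp [pvSetA, h, hi', PySem.List.index?_eq_idxOf?, List.filter_cons, List.filterMap_cons]
  · simp [pvSetA, h, PySem.List.index?_eq_idxOf?, List.filter_cons]

-- per-label equality of the two bodies
theorem pvBody_eq (attrs : List String) (attr : String) (label : List Int) :
    pvBodyA attrs attr label =
      (((pvConflicts attr).filter (fun a => attrs.contains a)).filterMap
        (fun a => PySem.List.index? attrs a)).foldl
          (fun l i => PySem.List.pySetD l (Int.ofNat i) 0) label := by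
  by_cases h1 : attr = "Bald"
  · subst h1
    rw [show pvConflicts "Bald" = ["Bangs"] from rfl, fold_filter_cons]
    simp [pvBodyA]
  by_cases h2 : attr = "Receding_Hairline"
  · subst h2
    rw [show pvConflicts "Receding_Hairline" = ["Bangs"] from rfl, fold_filter_cons]
    simp [pvBodyA]
  by_cases h3 : attr = "Bangs"
  · subst h3
    rw [show pvConflicts "Bangs" = ["Bald", "Receding_Hairline"] from rfl, fold_filter_cons, fold_filter_cons]
    simp [pvBodyA]
  by_cases h4 : attr = "Black_Hair"
  · subst h4
    rw [show pvConflicts "Black_Hair" = ["Blond_Hair", "Brown_Hair", "Gray_Hair"] from rfl, fold_filter_cons, fold_filter_cons, fold_filter_cons]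
    simp [pvBodyA]
  by_cases h5 : attr = "Blond_Hair"
  · subst h5
    rw [show pvConflicts "Blond_Hair" = ["Black_Hair", "Brown_Hair", "Gray_Hair"] from rfl, fold_filter_cons, fold_filter_cons, fold_filter_cons]
    simp [pvBodyA]
  by_cases h6 : attr = "Brown_Hair"
  · subst h6
    rw [show pvConflicts "Brown_Hair" = ["Black_Hair", "Blond_Hair", "Gray_Hair"] from rfl, fold_filter_cons, fold_filter_cons, fold_filter_cons]
    simp [pvBodyA]
  by_cases h7 : attr = "Gray_Hair"
  · subst h7
    rw [show pvConflicts "Gray_Hair" = ["Black_Hair", "Blond_Hair", "Brown_Hair"] from rfl, fold_filter_cons, fold_filter_cons, fold_filter_cons]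
    simp [pvBodyA]
  by_cases h8 : attr = "Straight_Hair"
  · subst h8
    rw [show pvConflicts "Straight_Hair" = ["Wavy_Hair"] from rfl, fold_filter_cons]
    simp [pvBodyA]
  by_cases h9 : attr = "Wavy_Hair"
  · subst h9
    rw [show pvConflicts "Wavy_Hair" = ["Straight_Hair"] from rfl, fold_filter_cons]
    simp [pvBodyA]
  simp [pvBodyA, pvConflicts, h1, h2, h3, h4, h5, h6, h7, h8, h9]

-- ===== VERDICT (by name: the statement is the Claim_ definition above) =====
theorem check_attribute_conflict_spec : Claim_equal_check_attribute_conflict := by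
  intro label_batch attr attrs _ _
  unfold Spec_check_attribute_conflict check_attribute_conflict check_attribute_conflict_alt
  cases PySem.List.index? attrs attr with
  | none => rfl
  | some k => simpa using List.map_congr_left (fun label _ => pvBody_eq attrs attr label)
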